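-- pv_equiv track=rewrite | github.com/amorse25/GeneticAlgorithm-CSC535- | hw3.py | get_most_fit
-- ===== SOURCE A (Python) =====
-- def get_chrome_index(index, board):
--     board_index = []
--     for i in range(len(index)):
--         if(index[i] == 1):          # if index in the chrome is a 1 (meaning a hit on the board)
--             board_index.append(board[i])    # grab the value (phenotype version)
--     return board_index
--
-- def get_total_cost(chromes):
--     total_cost = sum(chromes)       # sum the total values for a total cost
--     return total_cost
--
-- def get_most_fit(offspring, final_chromes, board):
--     total_cost_chromes = []
--     index_to_remove = []
--     for i in range(len(final_chromes)):
--         final_chromes_cost = get_chrome_index(final_chromes[i], board)  # determine chromes cost of playing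
--         total_cost_chromes.append(get_total_cost(final_chromes_cost))
--
--     max_cost = max(total_cost_chromes)          # return the max cost out of all chromes (worst player)
--     for i in range(len(total_cost_chromes)):
--         if total_cost_chromes[i] == max_cost:
--             index_to_remove.append(i)           # retrieve the index of the worst player
--
--     if (len(index_to_remove) >= 2):             # if two or more instances of max cost were found
--                                                 # (multiple bad players resulted in the same max cost)
--         del total_cost_chromes[index_to_remove[0]]  # begin deletion from the population (first chrome)
--         del total_cost_chromes[index_to_remove[1]-1] # begin deletion from the population (second chrome)
--         del final_chromes[index_to_remove[0]]
--         del final_chromes[index_to_remove[1]-1]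
--
--     if (len(index_to_remove) == 1):             # if only one chrome had the max cost
--         del total_cost_chromes[index_to_remove[0]]  # remove from population and total cost list
--         del final_chromes[index_to_remove[0]]
--         max_cost = max(total_cost_chromes)          # now that removed, determine new worst cost
--         for i in range(len(total_cost_chromes)):
--             if total_cost_chromes[i] == max_cost:
--                 index_to_remove.append(i)           # determine the new index of new worst player
--         del total_cost_chromes[index_to_remove[1]]  # remove from the population and total cost list
--         del final_chromes[index_to_remove[1]]
--
--     for i in range(len(offspring)):
--         final_chromes.append(offspring[i])      #append offspring to chromes to create new population
--
--     return final_chromes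
-- ===== SOURCE B (Python) =====
-- def get_most_fit(offspring, final_chromes, board):
--     # Cost of each chromosome in one pass; remove the two worst (first occurrences), append offspring.
--     # Equivalence is about the return value; like A, final_chromes is mutated in place.
--     costs = [sum(b for g, b in zip(ch, board) if g == 1) for ch in final_chromes]
--     i1 = costs.index(max(costs))
--     del costs[i1]
--     i2 = costs.index(max(costs))
--     del final_chromes[i1]
--     del final_chromes[i2]
--     final_chromes.extend(offspring)
--     return final_chromes
-- ===== Notes on version B (the rewrite author's own statement) =====
-- stated objective: simpler
-- what changed: B builds the cost list in one zip-comprehension pass and replaces A's duplicated tie/no-tie deletion branches (collect ALL argmax indices, then branch on their count) by two uniform 'first index of max, delete it' steps before appending the offspring.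
import Mathlib
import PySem

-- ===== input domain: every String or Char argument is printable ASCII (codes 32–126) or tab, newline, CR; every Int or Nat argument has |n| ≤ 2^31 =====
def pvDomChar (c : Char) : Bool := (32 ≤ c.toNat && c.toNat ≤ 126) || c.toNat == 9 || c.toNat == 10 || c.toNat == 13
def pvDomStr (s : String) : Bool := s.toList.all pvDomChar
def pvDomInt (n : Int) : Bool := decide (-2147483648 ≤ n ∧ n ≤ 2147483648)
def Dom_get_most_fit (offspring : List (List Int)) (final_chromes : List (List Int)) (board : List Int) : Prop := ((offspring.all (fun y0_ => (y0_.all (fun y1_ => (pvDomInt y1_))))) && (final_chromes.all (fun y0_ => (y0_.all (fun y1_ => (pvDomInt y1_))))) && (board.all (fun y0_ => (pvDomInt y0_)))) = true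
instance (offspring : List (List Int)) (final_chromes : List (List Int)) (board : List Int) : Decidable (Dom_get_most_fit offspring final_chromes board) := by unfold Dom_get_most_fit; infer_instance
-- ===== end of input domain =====

-- B replaces A's duplicated tie/no-tie deletion branches by two successive
-- "find first argmax, delete it" steps over a cost list built in one pass (objective: simpler).
-- Like A, the Python B mutates final_chromes in place; the equivalence proved here is about the return value.


-- ===== PORT A =====
def get_chrome_index (index : List Int) (board : List Int) : List Int :=
  (PySem.List.pyRange 0 (PySem.List.len index) 1).foldl
    (fun acc i => if PySem.List.pyGetD index i 0 = 1 then acc ++ [PySem.List.pyGetD board i 0] else acc) []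

def get_total_cost (chromes : List Int) : Int := chromes.sum

def get_most_fit (offspring : List (List Int)) (final_chromes : List (List Int)) (board : List Int) : List (List Int) :=
  let total_cost_chromes :=
    (PySem.List.pyRange 0 (PySem.List.len final_chromes) 1).foldl
      (fun acc i => acc ++ [get_total_cost (get_chrome_index (PySem.List.pyGetD final_chromes i []) board)]) []
  let max_cost := (PySem.List.max? total_cost_chromes (fun x => x)).getD 0
  let index_to_remove :=
    (PySem.List.pyRange 0 (PySem.List.len total_cost_chromes) 1).foldl
      (fun acc i => if PySem.List.pyGetD total_cost_chromes i 0 = max_cost then acc ++ [i] else acc)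
      ([] : List Int)
  if 2 ≤ index_to_remove.length then
    let i0 := PySem.List.pyGetD index_to_remove 0 0
    let i1 := PySem.List.pyGetD index_to_remove 1 0
    let _total := (total_cost_chromes.eraseIdx i0.toNat).eraseIdx (i1 - 1).toNat
    let fc := (final_chromes.eraseIdx i0.toNat).eraseIdx (i1 - 1).toNat
    (PySem.List.pyRange 0 (PySem.List.len offspring) 1).foldl
      (fun acc i => acc ++ [PySem.List.pyGetD offspring i []]) fc
  else if index_to_remove.length = 1 then
    let i0 := PySem.List.pyGetD index_to_remove 0 0
    let total1 := total_cost_chromes.eraseIdx i0.toNat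
    let fc1 := final_chromes.eraseIdx i0.toNat
    let max_cost2 := (PySem.List.max? total1 (fun x => x)).getD 0
    let idx2 :=
      (PySem.List.pyRange 0 (PySem.List.len total1) 1).foldl
        (fun acc i => if PySem.List.pyGetD total1 i 0 = max_cost2 then acc ++ [i] else acc)
        index_to_remove
    let j := PySem.List.pyGetD idx2 1 0
    let _total2 := total1.eraseIdx j.toNat
    let fc2 := fc1.eraseIdx j.toNat
    (PySem.List.pyRange 0 (PySem.List.len offspring) 1).foldl
      (fun acc i => acc ++ [PySem.List.pyGetD offspring i []]) fc2
  else
    (PySem.List.pyRange 0 (PySem.List.len offspring) 1).foldl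
      (fun acc i => acc ++ [PySem.List.pyGetD offspring i []]) final_chromes

-- ===== PORT B =====
def chromeCost (ch : List Int) (board : List Int) : Int :=
  (ch.zip board).foldl (fun s p => if p.1 = 1 then s + p.2 else s) 0

def get_most_fit_alt (offspring : List (List Int)) (final_chromes : List (List Int)) (board : List Int) : List (List Int) :=
  let costs := final_chromes.map (fun ch => chromeCost ch board)
  let i1 := (PySem.List.index? costs ((PySem.List.max? costs (fun x => x)).getD 0)).getD 0
  let costs2 := costs.eraseIdx i1
  let i2 := (PySem.List.index? costs2 ((PySem.List.max? costs2 (fun x => x)).getD 0)).getD 0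
  ((final_chromes.eraseIdx i1).eraseIdx i2) ++ offspring

-- ===== PRECONDITION & SPEC =====
-- Pre_ excludes exactly the inputs on which Python A raises: fewer than two chromosomes
-- (ValueError from max([])) or a chromosome with a 1 at a position beyond the board (IndexError).
def Pre_get_most_fit (offspring : List (List Int)) (final_chromes : List (List Int)) (board : List Int) : Prop :=
  2 ≤ final_chromes.length ∧
  ∀ ch ∈ final_chromes, ∀ i : Nat, i < ch.length → ch.getD i 0 = 1 → i < board.length
instance (offspring : List (List Int)) (final_chromes : List (List Int)) (board : List Int) : Decidable (Pre_get_most_fit offspring final_chromes board) := by unfold Pre_get_most_fit; infer_instance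

def pvWitness_get_most_fit : List (List Int) × List (List Int) × List Int :=
  ([[1, 0]], [[1], [0, 1]], [5, 3])

def Spec_get_most_fit (offspring : List (List Int)) (final_chromes : List (List Int)) (board : List Int) (out : List (List Int)) : Prop := out = get_most_fit_alt offspring final_chromes board
instance (offspring : List (List Int)) (final_chromes : List (List Int)) (board : List Int) (out : List (List Int)) : Decidable (Spec_get_most_fit offspring final_chromes board out) := by unfold Spec_get_most_fit; infer_instance

-- ===== CLAIM (what is proved, stated in full; the proofs are below) =====
def Claim_equal_get_most_fit : Prop := ∀ (offspring : List (List Int)) (final_chromes : List (List Int)) (board : List Int), Dom_get_most_fit offspring final_chromes board → Pre_get_most_fit offspring final_chromes board → Spec_get_most_fit offspring final_chromes board (get_most_fit offspring final_chromes board)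


-- ===== LEMMAS AND PROOFS =====

-- the indices (in order) at which xs carries the value v
def idxOfEq (xs : List Int) (v : Int) : List Nat :=
  (List.range xs.length).filter (fun k => xs.getD k 0 = v)

lemma loop_collect (xs : List Int) (v : Int) (init : List Int) :
    (PySem.List.pyRange 0 (PySem.List.len xs) 1).foldl
      (fun acc i => if PySem.List.pyGetD xs i 0 = v then acc ++ [i] else acc) init
    = init ++ (idxOfEq xs v).map (fun k => Int.ofNat k) := by
  have h : PySem.List.len xs = (xs.length : Int) := by simp [PySem.List.len]
  rw [h, PySem.List.pyRange_zero_natCast, List.foldl_map]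
  simp only [PySem.List.pyGetD_natCast]
  rw [idxOfEq]
  rw [show (fun (acc : List Int) (k : Nat) => if xs.getD k 0 = v then acc ++ [(k:Int)] else acc)
      = (fun acc k => if (fun k => decide (xs.getD k 0 = v)) k = true then acc ++ [(fun k => Int.ofNat k) k] else acc) by
    funext acc k; simp]
  rw [PySem.List.foldl_append_if]

lemma idxOfEq_append (l t : List Int) (v : Int) :
    idxOfEq (l ++ t) v = idxOfEq l v ++ (idxOfEq t v).map (fun k => l.length + k) := by
  unfold idxOfEq
  rw [List.length_append, List.range_add, List.filter_append, List.filter_map]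
  congr 1
  · apply List.filter_congr
    intro k hk
    rw [List.mem_range] at hk
    simp [List.getElem?_append_left hk]
  · congr 1
    apply List.filter_congr
    intro k hk
    simp [Function.comp, List.getElem?_append_right (Nat.le_add_right _ _)]

lemma idxOfEq_nil_of_not_mem {l : List Int} {v : Int} (h : v ∉ l) : idxOfEq l v = [] := by
  unfold idxOfEq
  rw [List.filter_eq_nil_iff]
  intro k hk
  rw [List.mem_range] at hk
  simp only [decide_eq_true_eq]
  intro hc
  exact h (by rw [← hc, List.getD_eq_getElem l 0 hk]; exact List.getElem_mem hk)

lemma idxOfEq_singleton_self (v : Int) : idxOfEq [v] v = [0] := by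
  simp [idxOfEq]

lemma idxOfEq_of_index? {l : List Int} {v : Int} {k : Nat}
    (h : PySem.List.index? l v = some k) : ∃ rest, idxOfEq l v = k :: rest := by
  rw [PySem.List.index?_eq_some_iff] at h
  obtain ⟨pre, suf, rfl, rfl, hvp⟩ := h
  rw [show pre ++ v :: suf = pre ++ ([v] ++ suf) by simp,
    idxOfEq_append, idxOfEq_append, idxOfEq_nil_of_not_mem hvp, idxOfEq_singleton_self]
  refine ⟨(idxOfEq suf v).map (fun k => pre.length + (1 + k)), ?_⟩
  simp
  omega

lemma gci_eq (ch board : List Int) :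
    get_chrome_index ch board
    = ((List.range ch.length).filter (fun k => ch.getD k 0 = 1)).map (fun k => board.getD k 0) := by
  unfold get_chrome_index
  have h : PySem.List.len ch = (ch.length : Int) := by simp [PySem.List.len]
  rw [h, PySem.List.pyRange_zero_natCast, List.foldl_map]
  simp only [PySem.List.pyGetD_natCast]
  rw [show (fun (acc : List Int) (k : Nat) => if ch.getD k 0 = 1 then acc ++ [board.getD k 0] else acc)
      = (fun acc k => if (fun k => decide (ch.getD k 0 = 1)) k = true then acc ++ [(fun k => board.getD k 0) k] else acc) by
    funext acc k; simp]
  rw [PySem.List.foldl_append_if]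
  simp

lemma chromeCost_shift (l : List (Int × Int)) (a : Int) :
    l.foldl (fun s p => if p.1 = 1 then s + p.2 else s) a
    = a + l.foldl (fun s p => if p.1 = 1 then s + p.2 else s) 0 := by
  induction l generalizing a with
  | nil => simp
  | cons p l ih =>
    simp only [List.foldl_cons]
    rw [ih, ih (if p.1 = 1 then 0 + p.2 else 0)]
    split_ifs <;> ring

lemma chromeCost_cons (c : Int) (ch : List Int) (b : Int) (bs : List Int) :
    chromeCost (c :: ch) (b :: bs) = (if c = 1 then b else 0) + chromeCost ch bs := by
  unfold chromeCost
  rw [List.zip_cons_cons, List.foldl_cons, chromeCost_shift]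
  split_ifs <;> ring_nf

lemma G_cons (c : Int) (ch board : List Int) :
    ((List.range (c :: ch).length).filter (fun k => (c :: ch).getD k 0 = 1)).map (fun k => board.getD k 0)
    = (if c = 1 then [board.getD 0 0] else [])
      ++ ((List.range ch.length).filter (fun k => ch.getD k 0 = 1)).map (fun k => (board.drop 1).getD k 0) := by
  have hq : ((fun k => decide ((c :: ch).getD k 0 = 1)) ∘ Nat.succ) = (fun k => decide (ch.getD k 0 = 1)) :=
    funext (fun k => by simp)
  have hf : ((fun k => board.getD k 0) ∘ Nat.succ) = (fun k => (board.drop 1).getD k 0) :=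
    funext (fun k => by cases board <;> simp)
  rw [List.length_cons, List.range_succ_eq_map, List.filter_cons, List.filter_map, hq]
  by_cases hc : c = 1
  · rw [if_pos (by simp [hc]), List.map_cons, List.map_map, hf]
    simp [hc]
  · rw [if_neg (by simp [hc]), List.map_map, hf]
    simp [hc]

lemma cost_eq (ch : List Int) (board : List Int)
    (h : ∀ i : Nat, i < ch.length → ch.getD i 0 = 1 → i < board.length) :
    get_total_cost (get_chrome_index ch board) = chromeCost ch board := by
  unfold get_total_cost
  rw [gci_eq]
  induction ch generalizing board with
  | nil => simp [chromeCost]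
  | cons c ch ih =>
    have hh : ∀ i : Nat, i < ch.length → ch.getD i 0 = 1 → i < (board.drop 1).length := by
      intro i hi h1
      have := h (i+1) (by simpa using Nat.succ_lt_succ hi) (by simpa using h1)
      simp only [List.length_drop]
      omega
    rw [G_cons, List.sum_append, ih (board.drop 1) hh]
    cases board with
    | nil =>
      have hc : c ≠ 1 := by
        intro hc
        exact absurd (h 0 (by simp) (by simp [hc])) (by simp)
      simp [hc, chromeCost]
    | cons b bs =>
      rw [chromeCost_cons]
      by_cases hc : c = 1 <;> simp [hc]

lemma append_loop (off : List (List Int)) (init : List (List Int)) :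
    (PySem.List.pyRange 0 (PySem.List.len off) 1).foldl
      (fun acc i => acc ++ [PySem.List.pyGetD off i []]) init = init ++ off := by
  rw [PySem.List.foldl_pyRange_zero_pyGetD off [] (fun acc x => acc ++ [x]) init,
    PySem.List.foldl_append_singleton]

-- ===== VERDICT (by name: the statement is the Claim_ definition above) =====
theorem get_most_fit_spec : Claim_equal_get_most_fit := by
  intro off fc board _dom hpre
  obtain ⟨hlen, hcov⟩ := hpre
  unfold Spec_get_most_fit get_most_fit get_most_fit_alt
  dsimp only
  have htot : (PySem.List.pyRange 0 (PySem.List.len fc) 1).foldl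
      (fun acc i => acc ++ [get_total_cost (get_chrome_index (PySem.List.pyGetD fc i []) board)]) ([] : List Int)
      = fc.map (fun ch => chromeCost ch board) := by
    rw [PySem.List.foldl_pyRange_zero_pyGetD fc []
        (fun acc ch => acc ++ [get_total_cost (get_chrome_index ch board)]) [],
      PySem.List.foldl_append_singleton_eq_map, List.nil_append]
    exact List.map_congr_left (fun ch hch => cost_eq ch board (hcov ch hch))
  have hcslen : (fc.map (fun ch => chromeCost ch board)).length = fc.length := List.length_map _
  have hne : fc.map (fun ch => chromeCost ch board) ≠ [] := by
    intro h
    rw [h] at hcslen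
    simp at hcslen
    omega
  obtain ⟨v, hmax⟩ : ∃ v, PySem.List.max? (fc.map (fun ch => chromeCost ch board)) (fun x => x) = some v := by
    cases hm : PySem.List.max? (fc.map (fun ch => chromeCost ch board)) (fun x => x) with
    | none => exact absurd ((PySem.List.max?_eq_none_iff _ _).mp hm) hne
    | some w => exact ⟨w, rfl⟩
  have hvmem : v ∈ fc.map (fun ch => chromeCost ch board) := PySem.List.max?_mem hmax
  have hvmax : ∀ y ∈ fc.map (fun ch => chromeCost ch board), y ≤ v := PySem.List.max?_isMax hmax
  obtain ⟨k, hk⟩ : ∃ k, PySem.List.index? (fc.map (fun ch => chromeCost ch board)) v = some k :=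
    Option.isSome_iff_exists.mp ((PySem.List.index?_isSome_iff _ _).mpr hvmem)
  obtain ⟨pre, suf, hcs, hkL, hvpre⟩ :=
    (PySem.List.index?_eq_some_iff (fc.map (fun ch => chromeCost ch board)) v k).mp hk
  have herase : (pre ++ v :: suf).eraseIdx pre.length = pre ++ suf := by
    rw [List.eraseIdx_append_of_length_le (le_refl _)]
    simp
  have hidx : idxOfEq (pre ++ v :: suf) v
      = pre.length :: (idxOfEq suf v).map (fun j => pre.length + (1 + j)) := by
    rw [show pre ++ v :: suf = pre ++ ([v] ++ suf) by simp,
      idxOfEq_append, idxOfEq_append, idxOfEq_nil_of_not_mem hvpre, idxOfEq_singleton_self]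
    simp
    omega
  subst hkL
  have hmaxv : (PySem.List.max? (List.map (fun ch => chromeCost ch board) fc) (fun x => x)).getD 0 = v := by
    rw [hmax]; rfl
  have hkv : (PySem.List.index? (List.map (fun ch => chromeCost ch board) fc) v).getD 0 = pre.length := by
    rw [hk]; rfl
  rw [htot, hmaxv, hkv, loop_collect (List.map (fun ch => chromeCost ch board) fc) v [], List.nil_append]
  rw [hcs, hidx, List.map_cons]
  by_cases hsuf : v ∈ suf
  · -- at least two chromosomes carry the maximal cost
    obtain ⟨k2, hk2⟩ : ∃ k2, PySem.List.index? suf v = some k2 :=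
      Option.isSome_iff_exists.mp ((PySem.List.index?_isSome_iff suf v).mpr hsuf)
    obtain ⟨rest2, hrest2⟩ := idxOfEq_of_index? hk2
    rw [hrest2, List.map_cons, List.map_cons]
    rw [if_pos (by simp)]
    rw [append_loop, herase]
    simp only [PySem.List.pyGetD_ofNat', List.getD_cons_zero, List.getD_cons_succ]
    -- second max over pre ++ suf is still v
    have hvmem2 : v ∈ pre ++ suf := List.mem_append.mpr (Or.inr hsuf)
    obtain ⟨m2, hm2⟩ : ∃ m2, PySem.List.max? (pre ++ suf) (fun x => x) = some m2 := by
      cases hm : PySem.List.max? (pre ++ suf) (fun x => x) with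
      | none =>
        exact absurd hvmem2 (by rw [(PySem.List.max?_eq_none_iff _ _).mp hm]; simp)
      | some w => exact ⟨w, rfl⟩
    have hvmax' : ∀ y ∈ pre ++ v :: suf, y ≤ v := hcs ▸ hvmax
    have hm2v : m2 = v := by
      refine le_antisymm (hvmax' m2 ?_) ((PySem.List.max?_isMax hm2) v hvmem2)
      have := PySem.List.max?_mem hm2
      rcases List.mem_append.mp this with h | h
      · exact List.mem_append.mpr (Or.inl h)
      · exact List.mem_append.mpr (Or.inr (List.mem_cons_of_mem _ h))
    have hmax2v : (PySem.List.max? (pre ++ suf) (fun x => x)).getD 0 = v := by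
      rw [hm2, hm2v]; rfl
    rw [hmax2v]
    -- index of v in pre ++ suf
    obtain ⟨pre2, suf2, hsufeq, hlen2, hvpre2⟩ := (PySem.List.index?_eq_some_iff suf v k2).mp hk2
    have hk2' : PySem.List.index? (pre ++ suf) v = some (pre.length + k2) := by
      refine (PySem.List.index?_eq_some_iff _ _ _).mpr ⟨pre ++ pre2, suf2, ?_, ?_, ?_⟩
      · rw [hsufeq]; simp
      · simp [← hlen2]
      · simp only [List.mem_append, not_or]
        exact ⟨hvpre, hvpre2⟩
    have hk2v : (PySem.List.index? (pre ++ suf) v).getD 0 = pre.length + k2 := by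
      rw [hk2']; rfl
    rw [hk2v]
    have hX : (Int.ofNat pre.length).toNat = pre.length := by simp
    have hY : (Int.ofNat (pre.length + (1 + k2)) - 1).toNat = pre.length + k2 := by
      simp only [Int.ofNat_eq_natCast]
      omega
    rw [hX, hY]
  · -- a unique worst chromosome: second pass over the shortened list
    rw [idxOfEq_nil_of_not_mem hsuf, List.map_nil, List.map_nil]
    rw [if_neg (by simp), if_pos (by simp)]
    simp only [PySem.List.pyGetD_ofNat', List.getD_cons_zero]
    have hX : (Int.ofNat pre.length).toNat = pre.length := by simp
    rw [hX, herase]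
    -- the shortened cost list is nonempty
    have hlen2 : 1 ≤ (pre ++ suf).length := by
      have := congrArg List.length hcs
      simp only [List.length_map, List.length_append, List.length_cons] at this
      simp only [List.length_append]
      omega
    obtain ⟨m2, hm2⟩ : ∃ m2, PySem.List.max? (pre ++ suf) (fun x => x) = some m2 := by
      cases hm : PySem.List.max? (pre ++ suf) (fun x => x) with
      | none =>
        rw [(PySem.List.max?_eq_none_iff _ _).mp hm] at hlen2
        simp at hlen2
      | some w => exact ⟨w, rfl⟩
    have hm2v : (PySem.List.max? (pre ++ suf) (fun x => x)).getD 0 = m2 := by rw [hm2]; rfl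
    rw [hm2v]
    obtain ⟨j2, hj2⟩ : ∃ j2, PySem.List.index? (pre ++ suf) m2 = some j2 :=
      Option.isSome_iff_exists.mp
        ((PySem.List.index?_isSome_iff _ _).mpr (PySem.List.max?_mem hm2))
    obtain ⟨rest2, hrest2⟩ := idxOfEq_of_index? hj2
    rw [loop_collect, hrest2, List.map_cons]
    simp only [List.singleton_append, List.getD_cons_succ, List.getD_cons_zero]
    have hj2v : (PySem.List.index? (pre ++ suf) m2).getD 0 = j2 := by rw [hj2]; rfl
    rw [hj2v, append_loop]
    have hZ : (Int.ofNat j2).toNat = j2 := by simp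
    rw [hZ]
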